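-- pv_equiv track=rewrite | github.com/tim0120/imc_prosperity | manual1.py | possible_trades
-- ===== SOURCE A (Python) =====
-- T = [
--     [1, 0.5, 1.45, 0.75],
--     [1.95, 1, 3.1, 1.49],
--     [0.67, 0.31, 1, 0.48],
--     [1.34, 0.64, 1.98, 1]
-- ]
--
-- def possible_trades(curr, n):
--     if n == 0:
--         return curr
--     trades = []
--     for i in range(len(T)):
--         p = possible_trades(curr[:] + [i], n-1)
--         if type(p[0]) == int:
--             trades.append(p)
--         else:
--             trades += p
--
--     return trades
-- ===== SOURCE B (Python) =====
-- T = [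
--     [1, 0.5, 1.45, 0.75],
--     [1.95, 1, 3.1, 1.49],
--     [0.67, 0.31, 1, 0.48],
--     [1.34, 0.64, 1.98, 1]
-- ]
--
-- def possible_trades(curr, n):
--     if n == 0:
--         return curr
--     b = len(T)
--     out = []
--     for k in range(b ** n):
--         seq = []
--         for _ in range(n):
--             k, d = divmod(k, b)
--             seq.append(d)
--         seq.reverse()
--         out.append(curr + seq)
--     return out
-- ===== Notes on version B (the rewrite author's own statement) =====
-- stated objective: alternative
-- what changed: Replaces the recursive DFS with type-based flattening by a single iterative pass over range(4**n) that decodes each counter value into its base-4 digit sequence, keeping the verbatim n==0 flat-return guard.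
-- outside the precondition, e.g. on possible_trades([1, 2], 0): A returns [1, 2], B returns [1, 2]
import Mathlib
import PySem

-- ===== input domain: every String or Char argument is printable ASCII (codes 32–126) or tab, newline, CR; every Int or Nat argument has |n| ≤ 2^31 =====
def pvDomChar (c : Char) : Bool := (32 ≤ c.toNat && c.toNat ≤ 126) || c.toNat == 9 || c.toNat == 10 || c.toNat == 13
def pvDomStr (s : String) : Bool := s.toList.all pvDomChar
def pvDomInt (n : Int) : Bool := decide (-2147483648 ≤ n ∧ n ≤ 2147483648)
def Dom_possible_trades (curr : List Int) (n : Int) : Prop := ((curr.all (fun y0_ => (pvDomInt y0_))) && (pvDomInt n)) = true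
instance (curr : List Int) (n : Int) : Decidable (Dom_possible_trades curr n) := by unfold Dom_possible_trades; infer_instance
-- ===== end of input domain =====

-- B enumerates the 4^n trade sequences by decoding a base-4 counter instead of A's recursive
-- DFS with type-based flattening (objective: alternative, same asymptotic cost).

-- ===== PORT A =====
-- Python A only uses len(T) = 4 of the float table T.  The dynamically-typed recursion
-- returns either a flat row (n == 0, Python `curr`) or a list of rows; the Sum tag models
-- exactly Python's `type(p[0]) == int` test (curr holds ints, so p[0] is an int iff the
-- returned value is the flat row).
def possibleTradesGo : List Int → Nat → Sum (List Int) (List (List Int))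
  | curr, 0 => .inl curr
  | curr, m+1 =>
      .inr (([0, 1, 2, 3] : List Int).foldl (fun trades i =>
        match possibleTradesGo (curr ++ [i]) m with
        | .inl l => trades ++ [l]
        | .inr p => trades ++ p) [])

def possible_trades (curr : List Int) (n : Int) : List (List Int) :=
  match possibleTradesGo curr n.toNat with
  | .inl l => [l]   -- n ≤ 0: Python returns the flat list curr (n = 0) or diverges (n < 0); outside Pre_
  | .inr ts => ts

-- ===== PORT B =====
-- inner loop of Source B: n iterations of `k, d = divmod(k, 4); seq.append(d)`
def altDigitsLoop : Nat → Nat → List Int → List Int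
  | 0, _, seq => seq
  | m+1, k, seq => altDigitsLoop m (k / 4) (seq ++ [((k % 4 : Nat) : Int)])

def possible_trades_alt (curr : List Int) (n : Int) : List (List Int) :=
  if n = 0 then [curr]   -- Python B returns the flat list curr here; outside Pre_
  else (List.range (4 ^ n.toNat)).map (fun k => curr ++ (altDigitsLoop n.toNat k []).reverse)

-- ===== PRECONDITION & SPEC =====
-- Pre_ excludes n < 0 (both Pythons raise: A RecursionError, B TypeError) and n = 0, where
-- A returns the flat list curr — a value of type list[int], not of the declared return type
-- list[list[int]] (B returns the same flat list there).
def Pre_possible_trades (curr : List Int) (n : Int) : Prop := 1 ≤ n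
instance (curr : List Int) (n : Int) : Decidable (Pre_possible_trades curr n) := by unfold Pre_possible_trades; infer_instance
def pvWitness_possible_trades : List Int × Int := ([5], 2)

def Spec_possible_trades (curr : List Int) (n : Int) (out : List (List Int)) : Prop := out = possible_trades_alt curr n
instance (curr : List Int) (n : Int) (out : List (List Int)) : Decidable (Spec_possible_trades curr n out) := by unfold Spec_possible_trades; infer_instance

-- ===== CLAIM (what is proved, stated in full; the proofs are below) =====
def Claim_equal_possible_trades : Prop := ∀ (curr : List Int) (n : Int), Dom_possible_trades curr n → Pre_possible_trades curr n → Spec_possible_trades curr n (possible_trades curr n)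

-- ===== LEMMAS AND PROOFS =====

-- the lexicographic product [0..3]^n, prefix-major (the common spec both ports meet)
def prod4 : Nat → List (List Int)
  | 0 => [[]]
  | m+1 => ([0, 1, 2, 3] : List Int).flatMap (fun x => (prod4 m).map (fun s => x :: s))

theorem altDigitsLoop_acc (m : Nat) : ∀ (k : Nat) (seq : List Int),
    altDigitsLoop m k seq = seq ++ altDigitsLoop m k [] := by
  induction m with
  | zero => intro k seq; simp [altDigitsLoop]
  | succ m ih =>
      intro k seq
      rw [altDigitsLoop, altDigitsLoop, ih, ih (k / 4) ([] ++ [((k % 4 : Nat) : Int)])]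
      simp

theorem altDigitsLoop_split (m : Nat) : ∀ (i k : Nat), i < 4 → k < 4 ^ m →
    altDigitsLoop (m + 1) (i * 4 ^ m + k) [] = altDigitsLoop m k [] ++ [(i : Int)] := by
  induction m with
  | zero =>
      intro i k hi hk
      interval_cases k
      simp [altDigitsLoop]
      omega
  | succ m ih =>
      intro i k hi hk
      have h4 : (4 : Nat) ^ (m + 1) = 4 * 4 ^ m := by ring
      have hmod : (i * 4 ^ (m + 1) + k) % 4 = k % 4 := by
        rw [h4, Nat.mul_left_comm, Nat.mul_add_mod]
      have hdiv : (i * 4 ^ (m + 1) + k) / 4 = i * 4 ^ m + k / 4 := by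
        rw [h4, Nat.mul_left_comm, Nat.mul_add_div (by omega)]
      have hk' : k / 4 < 4 ^ m := by
        have : k < 4 * 4 ^ m := by rw [← h4]; exact hk
        omega
      rw [altDigitsLoop, altDigitsLoop_acc, hmod, hdiv, ih i (k / 4) hi hk']
      conv_rhs => rw [altDigitsLoop, altDigitsLoop_acc]
      simp

theorem range_four_mul (b : Nat) : List.range (4 * b) =
    (List.range 4).flatMap (fun i => (List.range b).map (fun k => i * b + k)) := by
  have h : 4 * b = b + (b + (b + b)) := by ring
  rw [h, List.range_add, List.range_add, List.range_add]
  simp only [List.range_succ, List.range_zero, List.nil_append, List.flatMap_append,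
    List.flatMap_singleton, List.map_append, List.map_map, List.append_assoc, Function.comp_def]
  have h2 : (2 : Nat) * b = b + b := by ring
  have h3 : (3 : Nat) * b = b + (b + b) := by ring
  simp [h2, h3, Nat.add_assoc]

theorem range_prod4 (n : Nat) :
    (List.range (4 ^ n)).map (fun k => (altDigitsLoop n k []).reverse) = prod4 n := by
  induction n with
  | zero => simp [altDigitsLoop, prod4]
  | succ n ih =>
      have h4 : (4 : Nat) ^ (n + 1) = 4 * 4 ^ n := by ring
      rw [h4, range_four_mul]
      rw [List.map_flatMap]
      have hblock : ∀ i : Nat, i < 4 →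
          ((List.range (4 ^ n)).map (fun k => i * 4 ^ n + k)).map
              (fun k => (altDigitsLoop (n + 1) k []).reverse)
            = (prod4 n).map (fun s => (i : Int) :: s) := by
        intro i hi
        rw [List.map_map, ← ih, List.map_map]
        apply List.map_congr_left
        intro k hk
        simp only [List.mem_range] at hk
        simp [altDigitsLoop_split n i k hi hk]
      have e0 := hblock 0 (by omega)
      have e1 := hblock 1 (by omega)
      have e2 := hblock 2 (by omega)
      have e3 := hblock 3 (by omega)
      have hr : List.range 4 = [0, 1, 2, 3] := by decide
      rw [hr]
      simp only [List.flatMap_cons, List.flatMap_nil, List.append_nil]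
      rw [e0, e1, e2, e3]
      simp [prod4]

theorem goA (m : Nat) : ∀ (curr : List Int),
    possibleTradesGo curr (m + 1) = .inr ((prod4 (m + 1)).map (fun s => curr ++ s)) := by
  induction m with
  | zero =>
      intro curr
      simp [possibleTradesGo, prod4, List.foldl]
  | succ m ih =>
      intro curr
      rw [possibleTradesGo]
      simp only [List.foldl, ih]
      simp [prod4, List.flatMap_cons, List.map_append, List.map_map, Function.comp_def,
        List.append_assoc]

-- ===== VERDICT (by name: the statement is the Claim_ definition above) =====
theorem possible_trades_spec : Claim_equal_possible_trades := by
  intro curr n _ hpre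
  unfold Pre_possible_trades at hpre
  unfold Spec_possible_trades possible_trades possible_trades_alt
  have hn : n ≠ 0 := by omega
  obtain ⟨m, hm⟩ : ∃ m : Nat, n.toNat = m + 1 := ⟨n.toNat - 1, by omega⟩
  rw [if_neg hn, hm, goA m curr]
  have := range_prod4 (m + 1)
  calc (prod4 (m + 1)).map (fun s => curr ++ s)
      = ((List.range (4 ^ (m + 1))).map (fun k => (altDigitsLoop (m + 1) k []).reverse)).map
          (fun s => curr ++ s) := by rw [this]
    _ = (List.range (4 ^ (m + 1))).map (fun k => curr ++ (altDigitsLoop (m + 1) k []).reverse) := by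
          rw [List.map_map]
          simp [Function.comp_def]
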